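-- pv_equiv track=rewrite | github.com/davidroeca/ProjectEuler | python/p049.py | find_arithmetic_subset
-- ===== SOURCE A (Python) =====
-- from itertools import permutations, combinations
--
-- def find_arithmetic_subset(l, sub_length):
--     length = len(l)
--     if length < sub_length:
--         return []
--     l_copy = [i for i in l]
--     l_copy.sort()
--     all_combs = [list(i) for i in combinations(l_copy, sub_length)]
--     for c in all_combs:
--         if all(c[i + 1] - c[i] == c[1] - c[0] for i in range(sub_length - 1)):
--             return c
--     return []
-- ===== SOURCE B (Python) =====
-- def find_arithmetic_subset(l, sub_length):
--     if sub_length < 0 or sub_length > len(l):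
--         return []
--     if sub_length == 0:
--         return []
--     s = sorted(l)
--     if sub_length == 1:
--         return [s[0]]
--     values = set(s)
--     for i, a in enumerate(s):
--         for b in s[i + 1:]:
--             d = b - a
--             if d == 0:
--                 if s.count(a) >= sub_length:
--                     return [a] * sub_length
--             elif all(a + m * d in values for m in range(2, sub_length)):
--                 return [a + m * d for m in range(sub_length)]
--     return []
-- ===== Notes on version B (the rewrite author's own statement) =====
-- stated objective: faster
-- what changed: Instead of enumerating all C(n,k) sorted combinations and testing each for being an arithmetic progression, B scans ordered pairs of positions in the sorted list: the first two elements fix the common difference, and the remaining members are checked by a set-membership / multiplicity lookup.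
import Mathlib
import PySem

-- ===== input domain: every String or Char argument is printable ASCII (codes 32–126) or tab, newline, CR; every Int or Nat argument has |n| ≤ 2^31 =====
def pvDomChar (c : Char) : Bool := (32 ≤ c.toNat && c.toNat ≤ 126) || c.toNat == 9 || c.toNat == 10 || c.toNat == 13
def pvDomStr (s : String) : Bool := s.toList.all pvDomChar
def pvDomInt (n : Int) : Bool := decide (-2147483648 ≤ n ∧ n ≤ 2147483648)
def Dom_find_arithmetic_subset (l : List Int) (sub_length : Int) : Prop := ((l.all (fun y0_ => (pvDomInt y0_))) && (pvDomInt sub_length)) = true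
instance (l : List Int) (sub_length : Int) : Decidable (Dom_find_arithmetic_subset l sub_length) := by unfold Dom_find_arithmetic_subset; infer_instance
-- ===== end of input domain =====

-- B replaces A's enumeration of all sorted k-combinations by a scan over ordered pairs of
-- the sorted list (the first two members fix the common difference; the remaining members
-- are checked by multiplicity / set membership); objective: faster (asymptotic).


-- ===== PORT A =====
-- itertools.combinations over a list: tuples in lexicographic order by index
def pvCombos : Nat → List Int → List (List Int)
  | 0, _ => [[]]
  | _+1, [] => []
  | k+1, x :: xs => (pvCombos k xs).map (fun c => x :: c) ++ pvCombos (k+1) xs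

-- all(c[i + 1] - c[i] == c[1] - c[0] for i in range(sub_length - 1)); every index is in
-- range wherever the generator evaluates it, so the pyGetD default is never used
def pvIsAP (k : Nat) (c : List Int) : Bool :=
  (List.range (k - 1)).all (fun i =>
    PySem.List.pyGetD c ((i : Int) + 1) 0 - PySem.List.pyGetD c (i : Int) 0
      == PySem.List.pyGetD c 1 0 - PySem.List.pyGetD c 0 0)

-- the loop 'for c in all_combs: if …: return c' is the first match, i.e. find?
def find_arithmetic_subset (l : List Int) (sub_length : Int) : List Int :=
  if PySem.List.len l < sub_length then []
  else
    let l_copy := PySem.List.sorted l (fun x => x) false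
    match (pvCombos sub_length.toNat l_copy).find? (pvIsAP sub_length.toNat) with
    | some c => c
    | none => []

-- ===== PORT B =====
-- inner loop: for b in s[i+1:]
def pvScan (s : List Int) (values : PySem.Set Int) (sub_length : Int) (a : Int) :
    List Int → Option (List Int)
  | [] => none
  | b :: rest =>
    let d := b - a
    if d = 0 then
      if sub_length ≤ (PySem.List.count s a : Int) then some (List.replicate sub_length.toNat a)
      else pvScan s values sub_length a rest
    else
      if (PySem.List.pyRange 2 sub_length 1).all (fun m => PySem.Set.contains values (a + m * d)) then
        some ((PySem.List.pyRange 0 sub_length 1).map (fun m => a + m * d))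
      else pvScan s values sub_length a rest

-- outer loop: for i, a in enumerate(s), with s[i+1:] the tail of the current suffix
def pvOuter (s : List Int) (values : PySem.Set Int) (sub_length : Int) :
    List Int → Option (List Int)
  | [] => none
  | a :: tail =>
    match pvScan s values sub_length a tail with
    | some r => some r
    | none => pvOuter s values sub_length tail

def find_arithmetic_subset_alt (l : List Int) (sub_length : Int) : List Int :=
  if sub_length < 0 ∨ PySem.List.len l < sub_length then []
  else if sub_length = 0 then []
  else
    let s := PySem.List.sorted l (fun x => x) false
    if sub_length = 1 then [PySem.List.pyGetD s 0 0]
    else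
      let values := PySem.Set.ofList s
      match pvOuter s values sub_length s with
      | some r => r
      | none => []

-- ===== PRECONDITION & SPEC =====
-- A raises ValueError (itertools.combinations with negative r) when sub_length < 0; excluded.
def Pre_find_arithmetic_subset (l : List Int) (sub_length : Int) : Prop := 0 ≤ sub_length
instance (l : List Int) (sub_length : Int) : Decidable (Pre_find_arithmetic_subset l sub_length) := by unfold Pre_find_arithmetic_subset; infer_instance

def pvWitness_find_arithmetic_subset : List Int × Int := ([3, 1, 7, 5], 3)

def Spec_find_arithmetic_subset (l : List Int) (sub_length : Int) (out : List Int) : Prop := out = find_arithmetic_subset_alt l sub_length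
instance (l : List Int) (sub_length : Int) (out : List Int) : Decidable (Spec_find_arithmetic_subset l sub_length out) := by unfold Spec_find_arithmetic_subset; infer_instance

-- ===== CLAIM (what is proved, stated in full; the proofs are below) =====
def Claim_equal_find_arithmetic_subset : Prop := ∀ (l : List Int) (sub_length : Int), Dom_find_arithmetic_subset l sub_length → Pre_find_arithmetic_subset l sub_length → Spec_find_arithmetic_subset l sub_length (find_arithmetic_subset l sub_length)

-- ===== LEMMAS AND PROOFS =====

def pvApl (K a d : Int) : List Int := (PySem.List.pyRange 0 K).map (fun m => a + m * d)

lemma length_pvApl (K a d : Int) : (pvApl K a d).length = K.toNat := by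
  simp [pvApl, PySem.List.length_pyRange_one]

lemma getElem_pvApl (K a d : Int) (i : Nat) (h : i < (pvApl K a d).length) :
    (pvApl K a d)[i] = a + i * d := by
  simp only [pvApl, List.getElem_map]
  rw [PySem.List.getElem_pyRange_one]
  ring

lemma mem_pvCombos : ∀ (xs : List Int) (k : Nat) (c : List Int),
    c ∈ pvCombos k xs ↔ c.Sublist xs ∧ c.length = k := by
  intro xs
  induction xs with
  | nil =>
    intro k c
    cases k with
    | zero => simp [pvCombos, List.sublist_nil, List.length_eq_zero_iff]
    | succ k =>
      simp only [pvCombos, List.not_mem_nil, false_iff]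
      rintro ⟨hs, hl⟩
      rw [List.sublist_nil] at hs
      subst hs; simp at hl
  | cons x xs ih =>
    intro k c
    cases k with
    | zero =>
      simp [pvCombos, List.length_eq_zero_iff]
      rintro rfl; exact List.nil_sublist _
    | succ k =>
      simp only [pvCombos, List.mem_append, List.mem_map, ih]
      constructor
      · rintro (⟨c', ⟨hs, hl⟩, rfl⟩ | ⟨hs, hl⟩)
        · exact ⟨List.cons_sublist_cons.mpr hs, by simp [hl]⟩
        · exact ⟨hs.cons _, hl⟩
      · rintro ⟨hs, hl⟩
        rcases List.sublist_cons_iff.mp hs with h | ⟨r, rfl, hr⟩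
        · exact Or.inr ⟨h, hl⟩
        · exact Or.inl ⟨r, ⟨hr, by simpa using hl⟩, rfl⟩

lemma incr_sublist : ∀ (ys t : List Int), ys.Pairwise (· ≤ ·) → t.Pairwise (· < ·) →
    (∀ v ∈ t, v ∈ ys) → t.Sublist ys := by
  intro ys
  induction ys with
  | nil =>
    intro t _ _ hmem
    cases t with
    | nil => exact List.Sublist.refl _
    | cons v t => exact absurd (hmem v (by simp)) (by simp)
  | cons z ys ih =>
    intro t hys ht hmem
    cases t with
    | nil => exact List.nil_sublist _
    | cons v t =>
      rcases List.pairwise_cons.mp hys with ⟨hz, hys'⟩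
      rcases List.pairwise_cons.mp ht with ⟨hv, ht'⟩
      by_cases hvz : v = z
      · subst hvz
        refine List.cons_sublist_cons.mpr (ih t hys' ht' ?_)
        intro w hw
        rcases List.mem_cons.mp (hmem w (by simp [hw])) with h | h
        · exact absurd (h ▸ hv w hw) (lt_irrefl _)
        · exact h
      · refine (ih (v :: t) hys' ht ?_).cons z
        intro w hw
        rcases List.mem_cons.mp (hmem w hw) with h | h
        · -- w = z
          rcases List.mem_cons.mp hw with rfl | hw'
          · exact absurd h hvz
          · have hv_mem := List.mem_cons.mp (hmem v (by simp))
            have hzv : z ≤ v := by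
              rcases hv_mem with rfl | hv'
              · exact le_refl _
              · exact hz v hv'
            have hvw : v < w := hv w hw'
            rw [h] at hvw
            exact absurd hvw (not_lt.mpr hzv)
        · exact h

lemma isAP_cond (k : Nat) (c : List Int) :
    pvIsAP k c = true ↔ ∀ i : Nat, i < k - 1 →
      c.getD (i+1) 0 - c.getD i 0 = c.getD 1 0 - c.getD 0 0 := by
  simp only [pvIsAP, List.all_eq_true, List.mem_range, beq_iff_eq]
  have h1 : ∀ i : Nat, ((i : Int) + 1) = ((i + 1 : Nat) : Int) := by intro i; push_cast; ring
  have e0 : PySem.List.pyGetD c 0 0 = c.getD 0 0 := by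
    rw [show (0 : Int) = ((0 : Nat) : Int) by simp, PySem.List.pyGetD_natCast]
  have e1 : PySem.List.pyGetD c 1 0 = c.getD 1 0 := by
    rw [show (1 : Int) = ((1 : Nat) : Int) by simp, PySem.List.pyGetD_natCast]
  constructor
  · intro h i hi
    have := h i hi
    rw [h1 i, PySem.List.pyGetD_natCast, PySem.List.pyGetD_natCast, e0, e1] at this
    exact this
  · intro h i hi
    rw [h1 i, PySem.List.pyGetD_natCast, PySem.List.pyGetD_natCast, e0, e1]
    exact h i hi

lemma isAP_pvApl (K a d : Int) (hK : 2 ≤ K) : pvIsAP K.toNat (pvApl K a d) = true := by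
  rw [isAP_cond]
  intro i hi
  have hlen : (pvApl K a d).length = K.toNat := length_pvApl K a d
  have h1 : (1 : Nat) < K.toNat := by omega
  have h0 : (0 : Nat) < K.toNat := by omega
  have hi1 : i + 1 < K.toNat := by omega
  have hii : i < K.toNat := by omega
  rw [List.getD_eq_getElem _ _ (by omega : i + 1 < (pvApl K a d).length),
      List.getD_eq_getElem _ _ (by omega : i < (pvApl K a d).length),
      List.getD_eq_getElem _ _ (by omega : 1 < (pvApl K a d).length),
      List.getD_eq_getElem _ _ (by omega : 0 < (pvApl K a d).length),
      getElem_pvApl, getElem_pvApl, getElem_pvApl, getElem_pvApl]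
  push_cast; ring

lemma pvApl_of_isAP (K : Int) (hK : 2 ≤ K) (c : List Int) (hlen : c.length = K.toNat)
    (h : pvIsAP K.toNat c = true) : c = pvApl K (c.getD 0 0) (c.getD 1 0 - c.getD 0 0) := by
  rw [isAP_cond] at h
  set a := c.getD 0 0 with ha
  set d := c.getD 1 0 - c.getD 0 0 with hd
  have key : ∀ m : Nat, m < K.toNat → c.getD m 0 = a + m * d := by
    intro m
    induction m with
    | zero => intro _; simp [ha]
    | succ n ihn =>
      intro hm
      have hn : n < K.toNat := by omega
      cases n with
      | zero =>
        push_cast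
        rw [ha, hd]; ring_nf
      | succ p =>
        have hstep := h (p + 1) (by omega)
        have hprev := ihn (by omega)
        rw [hprev] at hstep
        push_cast at hstep ⊢
        linear_combination hstep
  refine List.ext_getElem (by rw [hlen, length_pvApl]) ?_
  intro i h1 h2
  rw [getElem_pvApl]
  rw [← List.getD_eq_getElem c 0 h1]
  exact key i (by omega)

def pvChk (s : List Int) (values : PySem.Set Int) (K a b : Int) : Bool :=
  if b - a = 0 then decide (K ≤ (PySem.List.count s a : Int))
  else (PySem.List.pyRange 2 K).all (fun m => PySem.Set.contains values (a + m * (b - a)))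

def pvMk (K a b : Int) : List Int :=
  if b - a = 0 then List.replicate K.toNat a
  else (PySem.List.pyRange 0 K).map (fun m => a + m * (b - a))

lemma pvScan_eq_find? (s : List Int) (values : PySem.Set Int) (K a : Int) :
    ∀ r : List Int, pvScan s values K a r = (r.find? (pvChk s values K a)).map (pvMk K a) := by
  intro r
  induction r with
  | nil => simp [pvScan]
  | cons b rest ih =>
    have hexp : pvScan s values K a (b :: rest)
        = if b - a = 0 then
            (if K ≤ (PySem.List.count s a : Int) then some (List.replicate K.toNat a)
             else pvScan s values K a rest)
          else
            (if (PySem.List.pyRange 2 K).all (fun m => PySem.Set.contains values (a + m * (b - a))) then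
               some ((PySem.List.pyRange 0 K).map (fun m => a + m * (b - a)))
             else pvScan s values K a rest) := rfl
    rw [hexp, List.find?_cons]
    cases hchk : pvChk s values K a b with
    | true =>
      unfold pvChk at hchk
      by_cases hd : b - a = 0
      · rw [if_pos hd] at hchk ⊢
        have hc : K ≤ (PySem.List.count s a : Int) := of_decide_eq_true hchk
        rw [if_pos hc]
        simp [pvMk, hd]
      · rw [if_neg hd] at hchk ⊢
        rw [if_pos hchk]
        simp [pvMk, hd]
    | false =>
      unfold pvChk at hchk
      by_cases hd : b - a = 0
      · rw [if_pos hd] at hchk ⊢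
        have hc : ¬ K ≤ (PySem.List.count s a : Int) := by simpa using hchk
        rw [if_neg hc]; simpa using ih
      · rw [if_neg hd] at hchk ⊢
        rw [if_neg (by simp only [hchk]; simp)]; simpa using ih

lemma pvApl_zero (K a : Int) : pvApl K a 0 = List.replicate K.toNat a := by
  refine List.ext_getElem (by simp [length_pvApl]) ?_
  intro i h1 h2
  rw [getElem_pvApl]
  simp

lemma pvApl_cons (K a d : Int) (hK : 2 ≤ K) :
    pvApl K a d = a :: (a + d) :: (PySem.List.pyRange 2 K).map (fun m => a + m * d) := by
  unfold pvApl
  rw [PySem.List.pyRange_one_cons (by omega : (0:Int) < K),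
      PySem.List.pyRange_one_cons (by omega : (0:Int) + 1 < K)]
  norm_num

lemma length_tl (K a d : Int) (hK : 2 ≤ K) :
    ((PySem.List.pyRange 2 K).map (fun m => a + m * d)).length = K.toNat - 2 := by
  simp [PySem.List.length_pyRange_one]
  omega

lemma sorted_split_gt (s pre ys : List Int) (y : Int)
    (hs : s = pre ++ y :: ys) (hsort : s.Pairwise (· ≤ ·)) :
    ∀ v ∈ s, y < v → v ∈ ys := by
  subst hs
  rcases List.pairwise_append.mp hsort with ⟨_, hyys, hcross⟩
  intro v hv hgt
  rcases List.mem_append.mp hv with h | h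
  · exact absurd hgt (not_lt.mpr (hcross v h y (by simp)))
  · rcases List.mem_cons.mp h with rfl | h
    · exact absurd hgt (lt_irrefl _)
    · exact h

lemma pvMk_eq_apl (K x y : Int) : pvMk K x y = pvApl K x (y - x) := by
  unfold pvMk
  by_cases hd : y - x = 0
  · rw [if_pos hd, hd, pvApl_zero]
  · rw [if_neg hd]; rfl

lemma pair_eq (K : Int) (hK : 2 ≤ K) (s p q ys : List Int) (x y : Int)
    (hs : s = p ++ x :: (q ++ y :: ys)) (hsort : s.Pairwise (· ≤ ·))
    (hdup : y = x → x ∈ p ∨ x ∈ q → pvChk s (PySem.Set.ofList s) K x y = false) :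
    ((pvCombos (K.toNat - 2) ys).map (fun c => x :: y :: c)).find? (pvIsAP K.toNat)
      = if pvChk s (PySem.Set.ofList s) K x y = true then some (pvMk K x y) else none := by
  have hk2 : 2 ≤ K.toNat := by omega
  have hxy : x ≤ y := by
    have hsub : (x :: (q ++ y :: ys)).Sublist s := hs ▸ List.sublist_append_right p _
    rcases List.pairwise_cons.mp (hsort.sublist hsub) with ⟨hx, _⟩
    exact hx y (by simp)
  have hys_sorted : ys.Pairwise (· ≤ ·) := by
    have hsub : ys.Sublist s := by
      rw [hs]
      refine List.Sublist.trans ?_ (List.sublist_append_right p _)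
      refine List.Sublist.trans ?_ (List.sublist_cons_self _ _)
      refine List.Sublist.trans ?_ (List.sublist_append_right q _)
      exact List.sublist_cons_self _ _
    exact hsort.sublist hsub
  have hgt : ∀ v ∈ s, y < v → v ∈ ys :=
    sorted_split_gt s (p ++ x :: q) ys y (by rw [hs]; simp) hsort
  have hys_mem : ∀ v ∈ ys, v ∈ s := by intro v hv; rw [hs]; simp [hv]
  set d := y - x with hdd
  set tl : List Int := (PySem.List.pyRange 2 K).map (fun m => x + m * d) with htl
  -- every member of the searched list that is an AP equals pvApl K x d
  have memchar : ∀ w ∈ (pvCombos (K.toNat - 2) ys).map (fun c => x :: y :: c),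
      pvIsAP K.toNat w = true → w = pvApl K x d ∧ ∃ c ∈ pvCombos (K.toNat - 2) ys, w = x :: y :: c := by
    intro w hw hap
    rcases List.mem_map.mp hw with ⟨c, hc, rfl⟩
    rcases (mem_pvCombos ys _ c).mp hc with ⟨hsub, hlen⟩
    have hwlen : (x :: y :: c).length = K.toNat := by simp [hlen]; omega
    have := pvApl_of_isAP K hK _ hwlen hap
    simp only [List.getD_cons_zero, List.getD_cons_succ] at this
    exact ⟨this, c, hc, rfl⟩
  have apl_cons : pvApl K x d = x :: y :: tl := by
    rw [pvApl_cons K x d hK, htl]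
    have : x + d = y := by rw [hdd]; ring
    rw [this]
  have htl_len : tl.length = K.toNat - 2 := length_tl K x d hK
  -- existence of an AP member ↔ tl is a sublist of ys
  have existsiff : (∃ c ∈ pvCombos (K.toNat - 2) ys, pvIsAP K.toNat (x :: y :: c) = true)
      ↔ tl.Sublist ys := by
    constructor
    · rintro ⟨c, hc, hap⟩
      rcases memchar _ (List.mem_map.mpr ⟨c, hc, rfl⟩) hap with ⟨heq, -⟩
      rw [apl_cons] at heq
      obtain ⟨-, -, rfl⟩ : x = x ∧ y = y ∧ c = tl := by
        injection heq with h1 h2; injection h2 with h3 h4; exact ⟨h1, h3, h4⟩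
      exact ((mem_pvCombos ys _ _).mp hc).1
    · intro hsub
      refine ⟨tl, (mem_pvCombos ys _ tl).mpr ⟨hsub, htl_len⟩, ?_⟩
      have : (x :: y :: tl) = pvApl K x d := apl_cons.symm
      rw [this]
      exact isAP_pvApl K x d hK
  -- the B-side check ↔ tl is a sublist of ys
  have chkiff : pvChk s (PySem.Set.ofList s) K x y = true ↔ tl.Sublist ys := by
    by_cases hd0 : d = 0
    · -- y = x
      have hyx : y = x := by omega
      have htl_rep : tl = List.replicate (K.toNat - 2) x := by
        rw [htl, hd0]
        simp [List.map_const']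
        omega
      have hcount : List.count x s = List.count x p + List.count x q + List.count x ys + 2 := by
        rw [hs, hyx]
        simp [List.count_append]
        ring
      have hchk_eq : pvChk s (PySem.Set.ofList s) K x y = decide (K ≤ (PySem.List.count s x : Int)) := by
        unfold pvChk
        rw [if_pos (by omega : y - x = 0)]
      rw [hchk_eq, htl_rep, List.replicate_sublist_iff, PySem.List.count_eq]
      constructor
      · intro hc
        have hKc : K ≤ (List.count x s : Int) := of_decide_eq_true hc
        have hnp : x ∉ p ∧ x ∉ q := by
          by_contra hmem
          have : x ∈ p ∨ x ∈ q := by tauto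
          have := hdup hyx this
          rw [hchk_eq, PySem.List.count_eq] at this
          simp [hKc] at this
        have h1 : List.count x p = 0 := List.count_eq_zero.mpr hnp.1
        have h2 : List.count x q = 0 := List.count_eq_zero.mpr hnp.2
        omega
      · intro hc
        refine decide_eq_true ?_
        omega
    · -- d > 0
      have hdpos : 0 < d := by
        rcases lt_or_eq_of_le hxy with h | h
        · omega
        · omega
      have hchk_eq : pvChk s (PySem.Set.ofList s) K x y
          = (PySem.List.pyRange 2 K).all (fun m => PySem.Set.contains (PySem.Set.ofList s) (x + m * d)) := by
        unfold pvChk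
        rw [if_neg (by omega : ¬ (y - x = 0))]
      have hcont : ∀ v : Int, PySem.Set.contains (PySem.Set.ofList s) v = true ↔ v ∈ s := by
        intro v; simp [PySem.Set.contains]
      have htl_gt : ∀ v ∈ tl, y < v := by
        intro v hv
        rcases List.mem_map.mp hv with ⟨m, hm, rfl⟩
        rcases PySem.List.mem_pyRange_one.mp hm with ⟨hm2, hmK⟩
        have hxd : x + d = y := by omega
        nlinarith
      have htl_lt : tl.Pairwise (· < ·) := by
        refine List.Pairwise.map _ ?_ (PySem.List.pairwise_lt_pyRange_one 2 K)
        intro m m' hmm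
        have : m * d < m' * d := by exact mul_lt_mul_of_pos_right hmm hdpos
        omega
      rw [hchk_eq, List.all_eq_true]
      constructor
      · intro hall
        refine incr_sublist ys tl hys_sorted htl_lt ?_
        intro v hv
        rcases List.mem_map.mp hv with ⟨m, hm, rfl⟩
        have := (hcont _).mp (hall m hm)
        exact hgt _ this (htl_gt _ hv)
      · intro hsub
        intro m hm
        refine (hcont _).mpr ?_
        exact hys_mem _ (hsub.subset (List.mem_map.mpr ⟨m, hm, rfl⟩))
  -- conclude
  by_cases hchk : pvChk s (PySem.Set.ofList s) K x y = true
  · rw [if_pos hchk]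
    rcases existsiff.mpr (chkiff.mp hchk) with ⟨c, hc, hap⟩
    cases hfind : ((pvCombos (K.toNat - 2) ys).map (fun c => x :: y :: c)).find? (pvIsAP K.toNat) with
    | none =>
      exact absurd hap ((List.find?_eq_none.mp hfind) _ (List.mem_map.mpr ⟨c, hc, rfl⟩))
    | some w =>
      have hw_mem := List.mem_of_find?_eq_some hfind
      have hw_ap := List.find?_some hfind
      rcases memchar w hw_mem hw_ap with ⟨heq, -⟩
      rw [heq, pvMk_eq_apl]
  · rw [if_neg hchk]
    refine List.find?_eq_none.mpr ?_
    intro w hw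
    intro hap
    rcases memchar w hw hap with ⟨-, c, hc, rfl⟩
    exact hchk (chkiff.mpr (existsiff.mp ⟨c, hc, hap⟩))

lemma inner_eq (K : Int) (hK : 2 ≤ K) (s : List Int) (hsort : s.Pairwise (· ≤ ·)) (x : Int) :
    ∀ (rest q p : List Int), s = p ++ x :: (q ++ rest) →
    (∀ x' ∈ p, ∀ y' ∈ x :: (q ++ rest), pvChk s (PySem.Set.ofList s) K x' y' = false) →
    (∀ y' ∈ q, pvChk s (PySem.Set.ofList s) K x y' = false) →
    ((pvCombos (K.toNat - 1) rest).map (fun c => x :: c)).find? (pvIsAP K.toNat)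
      = pvScan s (PySem.Set.ofList s) K x rest := by
  intro rest
  induction rest with
  | nil =>
    intro q p hs Hp Hq
    have h1 : K.toNat - 1 = (K.toNat - 2) + 1 := by omega
    rw [h1]
    simp [pvCombos, pvScan]
  | cons y ys ih =>
    intro q p hs Hp Hq
    have h1 : K.toNat - 1 = (K.toNat - 2) + 1 := by omega
    have hdecomp : pvCombos (K.toNat - 1) (y :: ys)
        = (pvCombos (K.toNat - 2) ys).map (fun c => y :: c) ++ pvCombos (K.toNat - 1) ys := by
      rw [h1]
      rfl
    rw [hdecomp, List.map_append, List.find?_append, List.map_map]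
    have hmm : ((fun c => x :: c) ∘ (fun c : List Int => y :: c)) = (fun c => x :: y :: c) := rfl
    rw [hmm]
    have hdup : y = x → x ∈ p ∨ x ∈ q → pvChk s (PySem.Set.ofList s) K x y = false := by
      intro hyx hmem
      rcases hmem with h | h
      · exact Hp x h y (by simp)
      · have := Hq x h
        rw [hyx]
        simpa [hyx] using this
    rw [pair_eq K hK s p q ys x y hs hsort hdup]
    rw [pvScan_eq_find? s _ K x (y :: ys), List.find?_cons]
    cases hchk : pvChk s (PySem.Set.ofList s) K x y with
    | true => simp
    | false =>
      have hih := ih (q ++ [y]) p (by simpa [List.append_assoc] using hs)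
        (by intro x' hx' y' hy'; exact Hp x' hx' y' (by simpa [List.append_assoc] using hy'))
        (by intro y' hy'
            rcases List.mem_append.mp hy' with h | h
            · exact Hq y' h
            · rcases List.mem_singleton.mp h with rfl
              exact hchk)
      rw [pvScan_eq_find? s _ K x ys] at hih
      simpa using hih

lemma outer_eq (K : Int) (hK : 2 ≤ K) (s : List Int) (hsort : s.Pairwise (· ≤ ·)) :
    ∀ (rest p : List Int), s = p ++ rest →
    (∀ x' ∈ p, ∀ y' ∈ rest, pvChk s (PySem.Set.ofList s) K x' y' = false) →
    (pvCombos K.toNat rest).find? (pvIsAP K.toNat) = pvOuter s (PySem.Set.ofList s) K rest := by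
  intro rest
  induction rest with
  | nil =>
    intro p hs Hp
    have h1 : K.toNat = (K.toNat - 1) + 1 := by omega
    rw [h1]
    simp [pvCombos, pvOuter]
  | cons x xs ih =>
    intro p hs Hp
    have h1 : K.toNat = (K.toNat - 1) + 1 := by omega
    have hdecomp : pvCombos K.toNat (x :: xs)
        = (pvCombos (K.toNat - 1) xs).map (fun c => x :: c) ++ pvCombos K.toNat xs := by
      conv_lhs => rw [h1]
      rw [show pvCombos ((K.toNat - 1) + 1) (x :: xs)
          = (pvCombos (K.toNat - 1) xs).map (fun c => x :: c) ++ pvCombos ((K.toNat - 1) + 1) xs from rfl]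
      rw [← h1]
    rw [hdecomp, List.find?_append]
    have hinner := inner_eq K hK s hsort x xs [] p (by simpa using hs)
      (by intro x' hx' y' hy'; exact Hp x' hx' y' (by simpa using hy'))
      (by intro y' hy'; simp at hy')
    rw [hinner]
    show _ = pvOuter s (PySem.Set.ofList s) K (x :: xs)
    cases hscan : pvScan s (PySem.Set.ofList s) K x xs with
    | some r => simp [pvOuter, hscan]
    | none =>
      have hchk_all : ∀ y' ∈ xs, pvChk s (PySem.Set.ofList s) K x y' = false := by
        rw [pvScan_eq_find? s _ K x xs] at hscan
        have : xs.find? (pvChk s (PySem.Set.ofList s) K x) = none := by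
          cases hf : xs.find? (pvChk s (PySem.Set.ofList s) K x) with
          | none => rfl
          | some b => rw [hf] at hscan; simp at hscan
        intro y' hy'
        have := List.find?_eq_none.mp this y' hy'
        simpa using this
      have hih := ih (p ++ [x]) (by simpa [List.append_assoc] using hs)
        (by intro x' hx' y' hy'
            rcases List.mem_append.mp hx' with h | h
            · exact Hp x' h y' (by simp [hy'])
            · rcases List.mem_singleton.mp h with rfl
              exact hchk_all y' hy')
      rw [hih]
      simp [pvOuter, hscan]


lemma pvCombos_zero : ∀ xs : List Int, pvCombos 0 xs = [[]] := by
  intro xs; cases xs <;> rfl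

theorem main_eq (l : List Int) (K : Int) (hK : 0 ≤ K) :
    find_arithmetic_subset l K = find_arithmetic_subset_alt l K := by
  by_cases hlen : PySem.List.len l < K
  · unfold find_arithmetic_subset find_arithmetic_subset_alt
    rw [if_pos hlen, if_pos (Or.inr hlen)]
  · unfold find_arithmetic_subset find_arithmetic_subset_alt
    rw [if_neg hlen, if_neg (by rw [not_or]; exact ⟨by omega, hlen⟩)]
    have hslen : (PySem.List.sorted l (fun x => x) false).length = l.length :=
      PySem.List.length_sorted l _ false
    have hsort : (PySem.List.sorted l (fun x => x) false).Pairwise (· ≤ ·) :=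
      PySem.List.sorted_pairwise l (fun x => x)
    rw [PySem.List.len_eq] at hlen
    rcases lt_trichotomy K 1 with h0 | h1 | h2
    · -- K = 0
      have hk0 : K = 0 := by omega
      subst hk0
      rw [if_pos rfl]
      change (match (pvCombos (0:Int).toNat (PySem.List.sorted l (fun x => x) false)).find?
          (pvIsAP (0:Int).toNat) with
        | some c => c | none => ([] : List Int)) = []
      rw [show (0 : Int).toNat = 0 from rfl, pvCombos_zero]
      rfl
    · -- K = 1
      subst h1
      rw [if_neg (by norm_num), if_pos rfl]
      have hsne : PySem.List.sorted l (fun x => x) false ≠ [] := by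
        intro h
        rw [h] at hslen
        simp at hslen
        rw [← hslen] at hlen
        simp at hlen
      rcases List.exists_cons_of_ne_nil hsne with ⟨m, t, hst⟩
      change (match (pvCombos (1:Int).toNat (PySem.List.sorted l (fun x => x) false)).find?
          (pvIsAP (1:Int).toNat) with
        | some c => c | none => ([] : List Int))
        = [PySem.List.pyGetD (PySem.List.sorted l (fun x => x) false) 0 0]
      rw [hst, show (1 : Int).toNat = 1 from rfl]
      rw [show pvCombos 1 (m :: t) = (pvCombos 0 t).map (fun c => m :: c) ++ pvCombos 1 t from rfl]
      rw [pvCombos_zero]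
      simp only [List.map_cons, List.map_nil, List.cons_append, List.nil_append, List.find?]
      rw [show pvIsAP 1 [m] = true from rfl]
      rw [PySem.List.pyGetD_zero_cons]
    · -- 2 ≤ K
      have h2' : 2 ≤ K := by omega
      rw [if_neg (by omega), if_neg (by omega)]
      have houter := outer_eq K h2' (PySem.List.sorted l (fun x => x) false) hsort
        (PySem.List.sorted l (fun x => x) false) [] rfl (by intro x' hx'; simp at hx')
      change (match (pvCombos K.toNat (PySem.List.sorted l (fun x => x) false)).find?
          (pvIsAP K.toNat) with
        | some c => c | none => ([] : List Int))
        = (match pvOuter (PySem.List.sorted l (fun x => x) false)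
            (PySem.Set.ofList (PySem.List.sorted l (fun x => x) false)) K
            (PySem.List.sorted l (fun x => x) false) with
        | some r => r | none => ([] : List Int))
      rw [houter]


-- ===== VERDICT (by name: the statement is the Claim_ definition above) =====
theorem find_arithmetic_subset_spec : Claim_equal_find_arithmetic_subset := by
  unfold Claim_equal_find_arithmetic_subset
  intro l sub_length _ hpre
  unfold Spec_find_arithmetic_subset
  exact main_eq l sub_length hpre
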